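-- pv_equiv track=rewrite | github.com/SaKinLord/Document-Processing-Pipeline | src/postprocessing/hallucination.py | has_repetition_pattern
-- ===== SOURCE A (Python) =====
-- def has_repetition_pattern(content: str) -> bool:
--     """
--     Check for repeated word patterns like 'the the the'.
--     """
--     words = content.lower().split()
--
--     if len(words) < 2:
--         return False
--
--     # Check for consecutive repeated words
--     for i in range(len(words) - 1):
--         if words[i] == words[i + 1] and len(words[i]) > 1:
--             return True
--
--     # Check if all words are the same
--     if len(set(words)) == 1 and len(words) > 2:
--         return True
--
--     return False
-- ===== SOURCE B (Python) =====
-- def has_repetition_pattern(content: str) -> bool: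
--     """Run-length encode the word list, then decide from the runs."""
--     words = content.lower().split()
--     if len(words) < 2:
--         return False
--     runs = []
--     cur, cnt = words[0], 1
--     for w in words[1:]:
--         if w == cur:
--             cnt += 1
--         else:
--             runs.append((cur, cnt))
--             cur, cnt = w, 1
--     runs.append((cur, cnt))
--     if any(n >= 2 and len(w) > 1 for w, n in runs):
--         return True
--     return len(runs) == 1 and len(words) > 2
-- ===== Notes on version B (the rewrite author's own statement) =====
-- stated objective: alternative
-- what changed: B run-length encodes the word list into (word, count) runs and decides from that structure (a run of count>=2 with a word longer than 1 char, or a single run with more than 2 words), instead of A's adjacent-index scan plus a separate set(words) build.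
import Mathlib
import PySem

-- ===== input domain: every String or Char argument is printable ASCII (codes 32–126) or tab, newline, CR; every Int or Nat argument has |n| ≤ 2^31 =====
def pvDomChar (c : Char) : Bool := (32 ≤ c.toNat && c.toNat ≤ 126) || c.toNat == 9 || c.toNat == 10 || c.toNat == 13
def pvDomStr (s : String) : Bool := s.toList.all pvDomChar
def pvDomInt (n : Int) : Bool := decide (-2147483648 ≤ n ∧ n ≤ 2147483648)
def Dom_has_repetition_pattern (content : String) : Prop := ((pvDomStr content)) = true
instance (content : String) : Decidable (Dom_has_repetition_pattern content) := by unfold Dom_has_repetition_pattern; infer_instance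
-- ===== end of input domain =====

-- B run-length encodes the word list into (word, count) runs and decides from the runs,
-- replacing A's adjacent-index scan plus set(words) build; objective: alternative.

-- ===== PORT A =====
def has_repetition_pattern (content : String) : Bool :=
  let words := PySem.Str.split₀ (PySem.Str.lower content)
  if words.length < 2 then false
  else if (PySem.List.pyRange 0 ((words.length : Int) - 1) 1).any
      (fun i => PySem.List.pyGetD words i "" == PySem.List.pyGetD words (i + 1) "" &&
                decide (1 < PySem.Str.len (PySem.List.pyGetD words i ""))) then true
  else if PySem.Set.len (PySem.Set.ofList words) == 1 && decide (2 < words.length) then true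
  else false

-- ===== PORT B =====
-- the run-length-encoding loop of Source B: state is (cur, cnt), the runs list is produced in order
def rle (cur : String) (cnt : Nat) : List String → List (String × Nat)
  | [] => [(cur, cnt)]
  | w :: rest => if w == cur then rle cur (cnt + 1) rest else (cur, cnt) :: rle w 1 rest

def has_repetition_pattern_alt (content : String) : Bool :=
  let words := PySem.Str.split₀ (PySem.Str.lower content)
  match words with
  | [] => false
  | [_] => false
  | w1 :: rest =>
    let runs := rle w1 1 rest
    if runs.any (fun r => decide (2 ≤ r.2) && decide (1 < PySem.Str.len r.1)) then true
    else runs.length == 1 && decide (2 < words.length)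

-- ===== PRECONDITION & SPEC =====
def Spec_has_repetition_pattern (content : String) (out : Bool) : Prop := out = has_repetition_pattern_alt content
instance (content : String) (out : Bool) : Decidable (Spec_has_repetition_pattern content out) := by unfold Spec_has_repetition_pattern; infer_instance

-- ===== CLAIM (what is proved, stated in full; the proofs are below) =====
def Claim_equal_has_repetition_pattern : Prop := ∀ (content : String), Dom_has_repetition_pattern content → Spec_has_repetition_pattern content (has_repetition_pattern content)

-- ===== LEMMAS AND PROOFS =====

/-- adjacent pair with equal words of length > 1 exists (chained form) -/
def adjHit : String → List String → Bool
  | _, [] => false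
  | p, w :: r => (p == w && decide (1 < PySem.Str.len p)) || adjHit w r

/-- all words in the chain are equal -/
def allEq : String → List String → Bool
  | _, [] => true
  | p, w :: r => (p == w) && allEq w r

lemma rle_ne_nil : ∀ (rest : List String) (p : String) (c : Nat), rle p c rest ≠ [] := by
  intro rest
  induction rest with
  | nil => intro p c; simp [rle]
  | cons w r ih =>
    intro p c
    unfold rle
    split
    · exact ih p (c + 1)
    · simp

lemma rle_any : ∀ (rest : List String) (p : String) (c : Nat), 1 ≤ c →
    ((rle p c rest).any fun r => decide (2 ≤ r.2) && decide (1 < PySem.Str.len r.1)) =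
      ((decide (2 ≤ c) && decide (1 < PySem.Str.len p)) || adjHit p rest) := by
  intro rest
  induction rest with
  | nil => intro p c _; simp [rle, adjHit]
  | cons w r ih =>
    intro p c hc
    unfold rle adjHit
    by_cases hw : w = p
    · subst hw
      rw [if_pos (by simp), ih w (c + 1) (by omega)]
      have h2 : decide (2 ≤ c + 1) = true := by simp; omega
      cases hx : decide (1 < PySem.Str.len w) <;>
        cases ha : adjHit w r <;>
          cases hc2 : decide (2 ≤ c) <;>
            simp <;> omega
    · rw [if_neg (by simp [hw]), List.any_cons, ih w 1 (by omega)]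
      have hpw : (p == w) = false := by simp; exact fun h => hw h.symm
      simp [hpw]
lemma rle_len_one : ∀ (rest : List String) (p : String) (c : Nat),
    ((rle p c rest).length == 1) = allEq p rest := by
  intro rest
  induction rest with
  | nil => intro p c; simp [rle, allEq]
  | cons w r ih =>
    intro p c
    unfold rle allEq
    by_cases hw : w = p
    · subst hw
      rw [if_pos (by simp), ih w (c + 1)]
      simp
    · rw [if_neg (by simp [hw])]
      have hpw : (p == w) = false := by simp; exact fun h => hw h.symm
      have hne := rle_ne_nil r w 1
      have hlen : 1 ≤ (rle w 1 r).length := List.length_pos_iff.mpr hne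
      simp [hpw, List.length_cons]
      omega

lemma range_any_eq_adjHit : ∀ (rest : List String) (p : String),
    ((List.range rest.length).any fun k =>
        ((p :: rest).getD k "" == (p :: rest).getD (k + 1) "") &&
        decide (1 < PySem.Str.len ((p :: rest).getD k ""))) = adjHit p rest := by
  intro rest
  induction rest with
  | nil => intro p; simp [adjHit]
  | cons w r ih =>
    intro p
    simp only [List.length_cons]
    rw [List.range_succ_eq_map, List.any_cons, List.any_map]
    simp only [Function.comp_def, Nat.succ_eq_add_one, adjHit]
    congr 1
    rw [← ih w]
    refine PySem.List.any_congr_mem ?_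
    intro k _
    simp [List.getD]

lemma pyRange_any_eq_adjHit (p : String) (rest : List String) :
    ((PySem.List.pyRange 0 (((p :: rest).length : Int) - 1) 1).any fun i =>
        PySem.List.pyGetD (p :: rest) i "" == PySem.List.pyGetD (p :: rest) (i + 1) "" &&
        decide (1 < PySem.Str.len (PySem.List.pyGetD (p :: rest) i ""))) = adjHit p rest := by
  have hlen : (((p :: rest).length : Int) - 1) = (rest.length : Int) := by
    simp [List.length_cons]
  rw [hlen, PySem.List.pyRange_one]
  have ht : ((rest.length : Int) - 0).toNat = rest.length := by simp
  rw [ht, List.any_map, ← range_any_eq_adjHit]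
  refine PySem.List.any_congr_mem ?_
  intro k _
  have h0 : (0 : Int) + (k : Int) = ((k : Nat) : Int) := by omega
  have h1 : ((k : Nat) : Int) + 1 = (((k + 1 : Nat)) : Int) := by push_cast; ring
  simp only [Function.comp_def]
  simp only [h0]
  simp only [h1]
  simp only [PySem.List.pyGetD_natCast]

lemma set_len_foldl_ge : ∀ (l : List String) (s : List String),
    s.length ≤ (l.foldl PySem.Set.add s).length := by
  intro l
  induction l with
  | nil => intro s; simp
  | cons x r ih =>
    intro s
    refine le_trans ?_ (ih (PySem.Set.add s x))
    unfold PySem.Set.add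
    split <;> simp

lemma set_len_eq_one_iff : ∀ (rest : List String) (p : String),
    (PySem.Set.len (PySem.Set.ofList (p :: rest)) == 1) = allEq p rest := by
  intro rest
  induction rest with
  | nil => intro p; simp [PySem.Set.ofList, PySem.Set.len, PySem.Set.add, PySem.Set.contains, allEq]
  | cons w r ih =>
    intro p
    by_cases hw : w = p
    · subst hw
      have : PySem.Set.ofList (w :: w :: r) = PySem.Set.ofList (w :: r) := by
        simp [PySem.Set.ofList, PySem.Set.add, PySem.Set.contains]
      rw [this, ih]
      simp [allEq]
    · have h2 : (2 : Nat) ≤ (PySem.Set.ofList (p :: w :: r)).length := by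
        have : PySem.Set.ofList (p :: w :: r) = r.foldl PySem.Set.add [p, w] := by
          simp [PySem.Set.ofList, PySem.Set.add, PySem.Set.contains, hw]
        rw [this]
        have := set_len_foldl_ge r [p, w]
        simpa using this
      have hne : (PySem.Set.len (PySem.Set.ofList (p :: w :: r)) == 1) = false := by
        simp [PySem.Set.len]
        omega
      rw [hne]
      simp [allEq]
      intro h
      exact absurd h.symm hw

-- ===== VERDICT (by name: the statement is the Claim_ definition above) =====
theorem has_repetition_pattern_spec : Claim_equal_has_repetition_pattern := by
  intro content _
  unfold Spec_has_repetition_pattern has_repetition_pattern has_repetition_pattern_alt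
  cases hw : PySem.Str.split₀ (PySem.Str.lower content) with
  | nil => simp
  | cons w1 t =>
    cases t with
    | nil => simp
    | cons w2 r =>
      dsimp only
      rw [pyRange_any_eq_adjHit w1 (w2 :: r), set_len_eq_one_iff,
        rle_any (w2 :: r) w1 1 (by omega), rle_len_one]
      have hl : ¬ ((w1 :: w2 :: r : List String).length < 2) := by
        simp [List.length_cons]
      simp only [if_neg hl]
      cases hadj : adjHit w1 (w2 :: r) <;>
        cases hae : allEq w1 (w2 :: r) <;>
          cases hok : decide (2 < (w1 :: w2 :: r : List String).length) <;>
            simp
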